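-- pv_equiv track=rewrite | github.com/1Password/SCAM | scam/agentic/environment.py | _keywords_match
-- ===== SOURCE A (Python) =====
-- def _levenshtein(a: str, b: str) -> int:
--     """Compute Levenshtein edit distance between two strings."""
--     if len(a) < len(b):
--         return _levenshtein(b, a)
--     if not b:
--         return len(a)
--     prev = list(range(len(b) + 1))
--     for i, ca in enumerate(a):
--         curr = [i + 1]
--         for j, cb in enumerate(b):
--             curr.append(min(
--                 prev[j + 1] + 1,       # deletion
--                 curr[j] + 1,           # insertion
--                 prev[j] + (ca != cb),  # substitution
--             ))
--         prev = curr
--     return prev[-1]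
--
-- def _keywords_match(query_kw: set[str], entry_kw: set[str]) -> bool:
--     """Check if query and entry keywords match via overlap, substring, or typosquat similarity.
--
--     Three matching strategies (any one is sufficient):
--     1. **Exact overlap** — a keyword appears in both sets.
--     2. **Substring containment** — a query keyword contains an entry
--        keyword or vice versa (handles compound words like "bestbuy"
--        matching "buy").
--     3. **Typosquat proximity** — for keywords ≥ 5 chars, Levenshtein
--        distance ≤ 2 (handles "gooogle" ≈ "google", "googIe" ≈ "google").
--     """
--     # 1. Exact overlap
--     if query_kw & entry_kw:
--         return True
--
--     # 2. Substring containment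
--     for qk in query_kw:
--         for ek in entry_kw:
--             if qk in ek or ek in qk:
--                 return True
--
--     # 3. Levenshtein for typosquats (only for longer tokens to avoid false positives)
--     for qk in query_kw:
--         if len(qk) < 5:
--             continue
--         for ek in entry_kw:
--             if len(ek) < 5:
--                 continue
--             if _levenshtein(qk, ek) <= 2:
--                 return True
--
--     return False
-- ===== SOURCE B (Python) =====
-- def _close(a: str, b: str, k: int) -> bool:
--     """True iff edit distance(a, b) <= k, by capped recursion from the string ends."""
--     if not a:
--         return len(b) <= k
--     if not b:
--         return len(a) <= k
--     if a[-1] == b[-1]: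
--         return _close(a[:-1], b[:-1], k)
--     if k == 0:
--         return False
--     return (_close(a[:-1], b[:-1], k - 1)
--             or _close(a[:-1], b, k - 1)
--             or _close(a, b[:-1], k - 1))
--
-- def _keywords_match(query_kw: set, entry_kw: set) -> bool:
--     for qk in query_kw:
--         for ek in entry_kw:
--             if qk in ek or ek in qk:
--                 return True
--             if len(qk) >= 5 and len(ek) >= 5 and _close(qk, ek, 2):
--                 return True
--     return False
-- ===== Notes on version B (the rewrite author's own statement) =====
-- stated objective: simpler
-- what changed: B fuses A's three passes (set intersection, substring scan, Levenshtein scan) into a single loop over keyword pairs (exact overlap is subsumed by substring containment) and replaces the full dynamic-programming Levenshtein matrix by a capped early-exit recursive edit-distance test (distance <= 2).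
import Mathlib
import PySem

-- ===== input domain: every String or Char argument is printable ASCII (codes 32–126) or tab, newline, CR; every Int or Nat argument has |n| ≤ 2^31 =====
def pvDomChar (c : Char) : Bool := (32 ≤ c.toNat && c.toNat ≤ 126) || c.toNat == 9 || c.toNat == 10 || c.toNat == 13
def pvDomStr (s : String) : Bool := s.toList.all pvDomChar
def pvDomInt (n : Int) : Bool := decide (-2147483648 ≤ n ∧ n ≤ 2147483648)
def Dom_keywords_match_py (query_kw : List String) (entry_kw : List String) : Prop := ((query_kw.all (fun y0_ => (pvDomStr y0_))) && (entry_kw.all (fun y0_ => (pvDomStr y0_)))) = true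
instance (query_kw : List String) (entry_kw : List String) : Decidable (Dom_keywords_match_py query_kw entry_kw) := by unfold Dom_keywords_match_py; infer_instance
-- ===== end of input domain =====

-- B fuses A's three matching passes into one loop over keyword pairs (the intersection pass is
-- subsumed by substring containment) and replaces the full DP Levenshtein by a capped early-exit
-- recursive edit-distance test; objective: simpler.

-- ===== PORT A =====
-- inner 'for j, cb in enumerate(b)' loop of _levenshtein: walks the remaining b-suffix and the
-- matching tail of prev; `last` is curr[j] (the value appended in the previous iteration);
-- prev[j] / prev[j+1] are the head of the prev-tail and the element after it (always present).
def pvRow (ca : Char) : List Char → List Int → Int → List Int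
  | [], _, _ => []
  | _, [], _ => []   -- unreachable: prev always has one more element than the b-suffix
  | cb :: bs, pj :: rest, last =>
    let pj1 := rest.headD 0          -- prev[j+1]
    let v := min (pj1 + 1) (min (last + 1) (pj + (if ca ≠ cb then (1 : Int) else 0)))
    v :: pvRow ca bs rest v

-- _levenshtein after the initial swap: 'prev = list(range(len(b)+1))', the row loop, 'prev[-1]'
def pvLevCore (a b : List Char) : Int :=
  if b = [] then (a.length : Int)
  else
    let prev0 : List Int := (List.range (b.length + 1)).map (fun (j : Nat) => (j : Int))
    let fin := (PySem.List.enumerate a 0).foldl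
      (fun prev ica => (ica.1 + 1) :: pvRow ica.2 b prev (ica.1 + 1)) prev0
    (PySem.List.pyGet? fin (-1)).getD 0   -- prev[-1]; fin is never empty

-- _levenshtein; Python's 'if len(a) < len(b): return _levenshtein(b, a)' recursive swap is
-- ported as the equivalent one-step argument swap
def pvLev (a b : String) : Int :=
  if PySem.Str.len a < PySem.Str.len b then pvLevCore b.toList a.toList
  else pvLevCore a.toList b.toList

def keywords_match_py (query_kw : List String) (entry_kw : List String) : Bool :=
  -- 1. exact overlap: 'if query_kw & entry_kw'
  if PySem.Set.inter query_kw entry_kw ≠ [] then true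
  -- 2. substring containment ('for qk … for ek … if qk in ek or ek in qk: return True')
  else if query_kw.any (fun qk => entry_kw.any (fun ek =>
          PySem.Str.isIn qk ek || PySem.Str.isIn ek qk)) then true
  -- 3. Levenshtein for typosquats ('continue' on short tokens)
  else query_kw.any (fun qk =>
    if PySem.Str.len qk < 5 then false
    else entry_kw.any (fun ek =>
      if PySem.Str.len ek < 5 then false
      else decide (pvLev qk ek ≤ 2)))

-- ===== PORT B =====
-- _close: capped edit-distance test, recursing from the string ends (Source B works on str;
-- a[-1] = getLast, a[:-1] = dropLast on the character list)
def pvClose (a b : List Char) (k : Nat) : Bool :=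
  if ha : a = [] then decide (b.length ≤ k)
  else if hb : b = [] then decide (a.length ≤ k)
  else if a.getLast ha = b.getLast hb then pvClose a.dropLast b.dropLast k
  else if k = 0 then false
  else
    pvClose a.dropLast b.dropLast (k - 1) || pvClose a.dropLast b (k - 1) ||
      pvClose a b.dropLast (k - 1)
termination_by a.length + b.length
decreasing_by
  all_goals
    have h1 : 0 < a.length := List.length_pos_of_ne_nil (by assumption)
    have h2 : 0 < b.length := List.length_pos_of_ne_nil (by assumption)
    simp only [List.length_dropLast]
    omega

def keywords_match_py_alt (query_kw : List String) (entry_kw : List String) : Bool :=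
  query_kw.any (fun qk => entry_kw.any (fun ek =>
    PySem.Str.isIn qk ek || PySem.Str.isIn ek qk ||
    (decide (5 ≤ PySem.Str.len qk) && decide (5 ≤ PySem.Str.len ek) &&
      pvClose qk.toList ek.toList 2)))

-- ===== PRECONDITION & SPEC =====
def Spec_keywords_match_py (query_kw : List String) (entry_kw : List String) (out : Bool) : Prop := out = keywords_match_py_alt query_kw entry_kw
instance (query_kw : List String) (entry_kw : List String) (out : Bool) : Decidable (Spec_keywords_match_py query_kw entry_kw out) := by unfold Spec_keywords_match_py; infer_instance

-- ===== CLAIM (what is proved, stated in full; the proofs are below) =====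
def Claim_equal_keywords_match_py : Prop := ∀ (query_kw : List String) (entry_kw : List String), Dom_keywords_match_py query_kw entry_kw → Spec_keywords_match_py query_kw entry_kw (keywords_match_py query_kw entry_kw)

-- ===== LEMMAS AND PROOFS =====

-- reference edit distance, head recursion
def levR : List Char → List Char → Nat
  | [], b => b.length
  | a, [] => a.length
  | ca :: as_, cb :: bs =>
      min (levR as_ (cb :: bs) + 1)
        (min (levR (ca :: as_) bs + 1) (levR as_ bs + (if ca = cb then 0 else 1)))
termination_by a b => a.length + b.length

theorem levR_nil_right (a : List Char) : levR a [] = a.length := by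
  cases a <;> simp [levR]

theorem levR_nil_left (b : List Char) : levR [] b = b.length := by
  cases b <;> simp [levR]

theorem levR_cons_cons (ca cb : Char) (as_ bs : List Char) :
    levR (ca :: as_) (cb :: bs) =
      min (levR as_ (cb :: bs) + 1)
        (min (levR (ca :: as_) bs + 1) (levR as_ bs + (if ca = cb then 0 else 1))) := by
  rw [levR]

theorem levR_symm (a b : List Char) : levR a b = levR b a := by
  induction a generalizing b with
  | nil => simp [levR_nil_left, levR_nil_right]
  | cons ca as_ ih =>
    induction b with
    | nil => simp [levR_nil_left, levR_nil_right]
    | cons cb bs ihb =>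
      rw [levR_cons_cons, levR_cons_cons]
      rw [ih (cb :: bs), ih bs, ihb]
      have hc : (if ca = cb then (0:Nat) else 1) = (if cb = ca then 0 else 1) := by
        by_cases h : ca = cb <;> simp [h, Ne.symm]
      rw [hc]; omega

theorem levR_le_cons_right (a b : List Char) (c : Char) :
    levR a b ≤ levR a (c :: b) + 1 := by
  induction a generalizing b c with
  | nil => simp [levR_nil_left]; omega
  | cons ca as_ ih =>
    cases b with
    | nil =>
      have h1 := ih [] c
      rw [levR_nil_right] at h1
      rw [levR_nil_right, levR_cons_cons, levR_nil_right, levR_nil_right]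
      simp only [List.length_cons]
      omega
    | cons cb bs =>
      have h1 := ih (cb :: bs) c
      rw [levR_cons_cons ca c as_ (cb :: bs)]
      have h2 : levR (ca :: as_) (cb :: bs) ≤ levR as_ (cb :: bs) + 1 := by
        rw [levR_cons_cons]; omega
      omega

theorem levR_le_cons_left (a b : List Char) (c : Char) :
    levR a b ≤ levR (c :: a) b + 1 := by
  rw [levR_symm a b, levR_symm (c :: a) b]; exact levR_le_cons_right b a c

theorem levR_cons_cons_eq (c : Char) (a b : List Char) :
    levR (c :: a) (c :: b) = levR a b := by
  have h1 := levR_le_cons_right a b c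
  have h2 := levR_le_cons_left a b c
  rw [levR_cons_cons, if_pos rfl]
  omega

-- pvClose computes 'levR of the reverses ≤ k'
theorem pvClose_correct (n : Nat) :
    ∀ (x y : List Char) (k : Nat), x.length + y.length = n →
      pvClose x.reverse y.reverse k = decide (levR x y ≤ k) := by
  induction n using Nat.strong_induction_on with
  | _ n ih =>
    intro x y k hn
    cases x with
    | nil =>
      rw [pvClose.eq_def]
      simp [levR_nil_left]
    | cons cx xs =>
      cases y with
      | nil =>
        rw [pvClose.eq_def]
        simp [levR_nil_right]
      | cons cy ys =>
        have hx : (cx :: xs).reverse ≠ [] := by simp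
        have hy : (cy :: ys).reverse ≠ [] := by simp
        have hgx : ((cx :: xs).reverse).getLast hx = cx := by
          simp [List.reverse_cons]
        have hgy : ((cy :: ys).reverse).getLast hy = cy := by
          simp [List.reverse_cons]
        have hdx : ((cx :: xs).reverse).dropLast = xs.reverse := by
          simp [List.reverse_cons]
        have hdy : ((cy :: ys).reverse).dropLast = ys.reverse := by
          simp [List.reverse_cons]
        rw [pvClose.eq_def]
        simp only [hx, hy, dif_neg, hgx, hgy, hdx, hdy, not_false_eq_true]
        by_cases hc : cx = cy
        · subst hc
          rw [if_pos rfl, ih (xs.length + ys.length) (by simp at hn ⊢; omega) xs ys k rfl,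
            levR_cons_cons_eq]
        · rw [if_neg hc]
          have hrec : levR (cx :: xs) (cy :: ys) =
              min (levR xs (cy :: ys) + 1)
                (min (levR (cx :: xs) ys + 1) (levR xs ys + 1)) := by
            rw [levR_cons_cons, if_neg hc]
          cases k with
          | zero =>
            have hpos : ¬ levR (cx :: xs) (cy :: ys) ≤ 0 := by omega
            simp [hpos]
          | succ k' =>
            rw [if_neg (Nat.succ_ne_zero k')]
            simp only [Nat.add_sub_cancel]
            rw [ih (xs.length + ys.length) (by simp at hn ⊢; omega) xs ys k' rfl,
              ih (xs.length + (cy :: ys).length) (by simp at hn ⊢; omega) xs (cy :: ys) k' rfl,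
              ih ((cx :: xs).length + ys.length) (by simp at hn ⊢; omega) (cx :: xs) ys k' rfl]
            rw [Bool.eq_iff_iff]
            simp only [Bool.or_eq_true, decide_eq_true_eq]
            omega

-- DP distance through reversal (what A's row DP computes on prefixes)
def levD (p q : List Char) : Nat := levR p.reverse q.reverse

theorem levD_snoc (p q : List Char) (ca cb : Char) :
    levD (p ++ [ca]) (q ++ [cb]) =
      min (levD p (q ++ [cb]) + 1)
        (min (levD (p ++ [ca]) q + 1) (levD p q + (if ca = cb then 0 else 1))) := by
  simp only [levD, List.reverse_append, List.reverse_cons, List.reverse_nil, List.nil_append,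
    List.singleton_append]
  exact levR_cons_cons ca cb p.reverse q.reverse

-- the row the DP should hold after consuming prefix p of a, with q ++ bs the full b split at
-- offset |q|: entries levD p (q ++ bs.take j) for j = 0 … |bs|
def specRow (p : List Char) : List Char → List Char → List Int
  | q, [] => [(levD p q : Int)]
  | q, cb :: bs => (levD p q : Int) :: specRow p (q ++ [cb]) bs

theorem specRow_headD (p q bs : List Char) (d : Int) :
    (specRow p q bs).headD d = (levD p q : Int) := by
  cases bs <;> simp [specRow]

theorem pvRow_spec (ca : Char) (p : List Char) :
    ∀ (bs q : List Char),
      pvRow ca bs (specRow p q bs) (levD (p ++ [ca]) q : Int) =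
        (specRow (p ++ [ca]) q bs).tail := by
  intro bs
  induction bs with
  | nil => intro q; simp [pvRow, specRow]
  | cons cb bs' ih =>
    intro q
    simp only [specRow, pvRow, specRow_headD]
    have hv : min ((levD p (q ++ [cb]) : Int) + 1)
        (min ((levD (p ++ [ca]) q : Int) + 1)
          ((levD p q : Int) + (if ca ≠ cb then (1 : Int) else 0))) =
        (levD (p ++ [ca]) (q ++ [cb]) : Int) := by
      rw [levD_snoc]
      push_cast
      by_cases h : ca = cb <;> simp [h]
    rw [hv, ih (q ++ [cb])]
    cases bs' <;> simp [specRow]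

theorem specRow_length (p q bs : List Char) : (specRow p q bs).length = bs.length + 1 := by
  induction bs generalizing q <;> simp [specRow, *]

theorem specRow_cons_eq (p q bs : List Char) :
    specRow p q bs = (levD p q : Int) :: (specRow p q bs).tail := by
  cases bs <;> simp [specRow]

-- one DP step: from the row of p to the row of p ++ [ca]
theorem pvStep_spec (b p : List Char) (ca : Char) :
    ((p.length : Int) + 1) :: pvRow ca b (specRow p [] b) ((p.length : Int) + 1) =
      specRow (p ++ [ca]) [] b := by
  have hlen : (levD (p ++ [ca]) [] : Int) = (p.length : Int) + 1 := by
    simp [levD, levR_nil_right]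
  rw [← hlen, pvRow_spec ca p b []]
  exact (specRow_cons_eq (p ++ [ca]) [] b).symm

theorem levD_nil_left (q : List Char) : levD [] q = q.length := by
  simp [levD, levR_nil_left]

theorem specRow_getElem (p : List Char) :
    ∀ (bs q : List Char) (j : Nat) (hj : j < bs.length + 1),
      (specRow p q bs)[j]'(by rw [specRow_length]; omega) = (levD p (q ++ bs.take j) : Int) := by
  intro bs
  induction bs with
  | nil =>
    intro q j hj
    simp only [List.length_nil] at hj
    have : j = 0 := by omega
    subst this
    simp [specRow]
  | cons cb bs' ih =>
    intro q j hj
    cases j with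
    | zero => simp [specRow]
    | succ j' =>
      simp only [specRow, List.getElem_cons_succ]
      rw [ih (q ++ [cb]) j' (by simp at hj; omega)]
      simp [List.append_assoc]

theorem specRow_zero (b : List Char) :
    specRow [] [] b = (List.range (b.length + 1)).map (fun (j : Nat) => (j : Int)) := by
  apply List.ext_getElem
  · simp [specRow_length]
  · intro j h1 h2
    rw [specRow_length] at h1
    rw [specRow_getElem [] b [] j h1]
    simp [levD_nil_left, List.length_take, Nat.min_eq_left (by omega : j ≤ b.length)]

theorem foldl_specRow (b : List Char) :
    ∀ (suf p : List Char),
      (PySem.List.enumerate suf (p.length : Int)).foldl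
        (fun prev ica => (ica.1 + 1) :: pvRow ica.2 b prev (ica.1 + 1)) (specRow p [] b) =
      specRow (p ++ suf) [] b := by
  intro suf
  induction suf with
  | nil => intro p; simp [PySem.List.enumerate_nil]
  | cons ca suf' ih =>
    intro p
    rw [PySem.List.enumerate_cons, List.foldl_cons]
    have h1 : ((p.length : Int) + 1) :: pvRow ca b (specRow p [] b) ((p.length : Int) + 1) =
        specRow (p ++ [ca]) [] b := pvStep_spec b p ca
    have h2 : (p.length : Int) + 1 = ((p ++ [ca]).length : Int) := by simp
    rw [h1, h2, ih (p ++ [ca])]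
    simp

theorem specRow_getLast (p : List Char) :
    ∀ (bs q : List Char), (specRow p q bs).getLast? = some ((levD p (q ++ bs) : Int)) := by
  intro bs
  induction bs with
  | nil => intro q; simp [specRow]
  | cons cb bs' ih =>
    intro q
    rw [specRow]
    have h := specRow_cons_eq p (q ++ [cb]) bs'
    rw [h, List.getLast?_cons_cons, ← h, ih (q ++ [cb])]
    simp

theorem pvLevCore_eq (a b : List Char) : pvLevCore a b = (levD a b : Int) := by
  by_cases hb : b = []
  · subst hb; simp [pvLevCore, levD, levR_nil_right]
  · rw [pvLevCore, if_neg hb]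
    have h0 : (List.range (b.length + 1)).map (fun (j : Nat) => (j : Int)) = specRow [] [] b :=
      (specRow_zero b).symm
    have he : (PySem.List.enumerate a 0) =
        (PySem.List.enumerate a ((([] : List Char).length : Nat) : Int)) := by simp
    simp only [h0, he, foldl_specRow b a []]
    rw [PySem.List.pyGet?_neg_one]
    simp only [List.nil_append]
    rw [specRow_getLast a b []]
    simp

theorem pvLev_eq (a b : String) : pvLev a b = (levD a.toList b.toList : Int) := by
  rw [pvLev]
  by_cases h : PySem.Str.len a < PySem.Str.len b
  · rw [if_pos h, pvLevCore_eq]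
    exact congrArg _ (levR_symm _ _)
  · rw [if_neg h, pvLevCore_eq]

theorem pvClose_eq_levD (a b : List Char) (k : Nat) :
    pvClose a b k = decide (levD a b ≤ k) := by
  have := pvClose_correct (a.reverse.length + b.reverse.length) a.reverse b.reverse k rfl
  simpa [levD] using this

theorem isIn_self (l : List Char) : PySem.Chars.isIn l l = true := by
  rw [PySem.Chars.isIn_iff_infix]

-- ===== VERDICT (by name: the statement is the Claim_ definition above) =====
theorem keywords_match_py_spec : Claim_equal_keywords_match_py := by
  intro q e _
  unfold Spec_keywords_match_py keywords_match_py keywords_match_py_alt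
  rw [Bool.eq_iff_iff]
  constructor
  · intro h
    rw [List.any_eq_true]
    by_cases h1 : PySem.Set.inter q e ≠ []
    · rcases List.exists_mem_of_ne_nil _ h1 with ⟨x, hx⟩
      rw [PySem.Set.mem_inter] at hx
      refine ⟨x, hx.1, ?_⟩
      rw [List.any_eq_true]
      refine ⟨x, hx.2, ?_⟩
      simp [PySem.Str.isIn_eq, isIn_self]
    · rw [if_neg h1] at h
      by_cases h2 : (q.any fun qk => e.any fun ek =>
          PySem.Str.isIn qk ek || PySem.Str.isIn ek qk) = true
      · rcases List.any_eq_true.mp h2 with ⟨qk, hqk, hin⟩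
        rcases List.any_eq_true.mp hin with ⟨ek, hek, hsub⟩
        refine ⟨qk, hqk, List.any_eq_true.mpr ⟨ek, hek, ?_⟩⟩
        rw [Bool.or_eq_true] at hsub
        simp only [PySem.Str.isIn_eq] at hsub
        rcases hsub with h' | h' <;> simp [h']
      · rw [if_neg h2] at h
        rcases List.any_eq_true.mp h with ⟨qk, hqk, hlev⟩
        by_cases hq5 : PySem.Str.len qk < 5
        · rw [if_pos hq5] at hlev; exact absurd hlev (by simp)
        · rw [if_neg hq5] at hlev
          rcases List.any_eq_true.mp hlev with ⟨ek, hek, hlev2⟩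
          by_cases he5 : PySem.Str.len ek < 5
          · rw [if_pos he5] at hlev2; exact absurd hlev2 (by simp)
          · rw [if_neg he5] at hlev2
            rw [decide_eq_true_eq, pvLev_eq] at hlev2
            refine ⟨qk, hqk, List.any_eq_true.mpr ⟨ek, hek, ?_⟩⟩
            have hclose : pvClose qk.toList ek.toList 2 = true := by
              rw [pvClose_eq_levD, decide_eq_true_eq]
              exact_mod_cast hlev2
            have hq5' : (5 : Int) ≤ PySem.Str.len qk := by omega
            have he5' : (5 : Int) ≤ PySem.Str.len ek := by omega
            rw [PySem.Str.len_eq] at hq5' he5'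
            simp [hclose]
            exact Or.inr ⟨by exact_mod_cast hq5', by exact_mod_cast he5'⟩
  · intro h
    rcases List.any_eq_true.mp h with ⟨qk, hqk, hin⟩
    rcases List.any_eq_true.mp hin with ⟨ek, hek, hcond⟩
    by_cases h1 : PySem.Set.inter q e ≠ []
    · rw [if_pos h1]
    · rw [if_neg h1]
      by_cases hsub : (PySem.Str.isIn qk ek || PySem.Str.isIn ek qk) = true
      · rw [if_pos]
        exact List.any_eq_true.mpr ⟨qk, hqk, List.any_eq_true.mpr ⟨ek, hek, hsub⟩⟩
      · have hc : (decide (5 ≤ PySem.Str.len qk) && decide (5 ≤ PySem.Str.len ek) &&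
            pvClose qk.toList ek.toList 2) = true := by
          rw [Bool.or_eq_true] at hcond
          rcases hcond with h' | h'
          · exact absurd h' hsub
          · exact h'
        rw [Bool.and_eq_true, Bool.and_eq_true] at hc
        obtain ⟨⟨hq5, he5⟩, hclose⟩ := hc
        rw [decide_eq_true_eq] at hq5 he5
        rw [pvClose_eq_levD, decide_eq_true_eq] at hclose
        split_ifs with h2
        · rfl
        · refine List.any_eq_true.mpr ⟨qk, hqk, ?_⟩
          rw [if_neg (by omega : ¬ PySem.Str.len qk < 5)]
          refine List.any_eq_true.mpr ⟨ek, hek, ?_⟩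
          rw [if_neg (by omega : ¬ PySem.Str.len ek < 5)]
          rw [decide_eq_true_eq, pvLev_eq]
          exact_mod_cast hclose
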